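-- pv_equiv track=rewrite | github.com/artur-karapetyan/iponweb | HW4/Task13.py | coordinate
-- ===== SOURCE A (Python) =====
-- def coordinate(str):
--     x = 0
--     y = 0
--
--     for c in str:
--         if c == 'U':
--             y += 1
--         elif c == 'D':
--             y -= 1
--         elif c == 'L':
--             x -= 1
--         elif c == 'R':
--             x += 1
--
--     return x, y
-- ===== SOURCE B (Python) =====
-- def coordinate(str):
--     # count each move type once, then combine arithmetically
--     return (str.count('R') - str.count('L'), str.count('U') - str.count('D'))
-- ===== Notes on version B (the rewrite author's own statement) =====
-- stated objective: idiomatic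
-- what changed: B replaces the per-character branch-and-accumulate loop with four str.count calls and computes the coordinates arithmetically as (R-L, U-D).
import Mathlib
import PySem

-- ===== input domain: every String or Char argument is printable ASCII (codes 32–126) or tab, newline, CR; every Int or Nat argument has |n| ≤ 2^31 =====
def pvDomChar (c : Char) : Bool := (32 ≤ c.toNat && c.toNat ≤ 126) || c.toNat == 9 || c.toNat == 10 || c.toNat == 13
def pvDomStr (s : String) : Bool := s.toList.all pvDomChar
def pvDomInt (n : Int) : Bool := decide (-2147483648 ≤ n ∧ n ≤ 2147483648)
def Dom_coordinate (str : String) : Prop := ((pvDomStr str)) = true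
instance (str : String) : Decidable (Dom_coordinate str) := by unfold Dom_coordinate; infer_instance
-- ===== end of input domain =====

-- B replaces the per-character branching accumulation with a count-then-arithmetic formulation (idiomatic).


-- ===== PORT A =====
-- x = 0; y = 0; for c in str: branch on c; return (x, y)
def coordinate (str : String) : Int × Int :=
  str.toList.foldl (fun (p : Int × Int) c =>
    if c = 'U' then (p.1, p.2 + 1)
    else if c = 'D' then (p.1, p.2 - 1)
    else if c = 'L' then (p.1 - 1, p.2)
    else if c = 'R' then (p.1 + 1, p.2)
    else p) (0, 0)

-- ===== PORT B =====
-- return (str.count('R') - str.count('L'), str.count('U') - str.count('D'))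
def coordinate_alt (str : String) : Int × Int :=
  ((PySem.Str.count str "R" : Int) - (PySem.Str.count str "L" : Int),
   (PySem.Str.count str "U" : Int) - (PySem.Str.count str "D" : Int))

-- ===== PRECONDITION & SPEC =====
def Spec_coordinate (str : String) (out : Int × Int) : Prop := out = coordinate_alt str
instance (str : String) (out : Int × Int) : Decidable (Spec_coordinate str out) := by unfold Spec_coordinate; infer_instance

-- ===== CLAIM (what is proved, stated in full; the proofs are below) =====
def Claim_equal_coordinate : Prop := ∀ (str : String), Dom_coordinate str → Spec_coordinate str (coordinate str)

-- ===== LEMMAS AND PROOFS =====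

-- single-character s.count(c) is the plain character count
theorem pv_count_go_single (c : Char) (fuel : Nat) : ∀ (l : List Char) (acc : Nat), l.length ≤ fuel →
    PySem.Chars.count.go [c] fuel l acc = acc + l.count c := by
  induction fuel with
  | zero => intro l acc h; cases l with
    | nil => simp [PySem.Chars.count.go]
    | cons a t => simp at h
  | succ n ih => intro l acc h; cases l with
    | nil => simp [PySem.Chars.count.go]
    | cons a t =>
      by_cases hc : a = c
      · subst hc
        rw [PySem.Chars.count.go]
        simp [List.isPrefixOf, ih t _ (by simpa using h)]
        omega
      · rw [PySem.Chars.count.go]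
        simp [List.isPrefixOf, hc, ih t _ (by simpa using h)]
        intro h'; exact absurd h'.symm hc

theorem pv_count_single (s : List Char) (c : Char) : PySem.Chars.count s [c] = s.count c := by
  simp [PySem.Chars.count, pv_count_go_single c s.length s 0 le_rfl]

-- the fold's invariant: it adds the net counts to the accumulator
theorem pv_fold_counts (l : List Char) : ∀ (x y : Int),
    l.foldl (fun (p : Int × Int) c =>
      if c = 'U' then (p.1, p.2 + 1)
      else if c = 'D' then (p.1, p.2 - 1)
      else if c = 'L' then (p.1 - 1, p.2)
      else if c = 'R' then (p.1 + 1, p.2)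
      else p) (x, y)
    = (x + l.count 'R' - l.count 'L', y + l.count 'U' - l.count 'D') := by
  induction l with
  | nil => simp
  | cons a t ih =>
    intro x y
    by_cases hU : a = 'U'
    · subst hU; simp [List.foldl_cons, ih]; omega
    · by_cases hD : a = 'D'
      · subst hD; simp [List.foldl_cons, ih]; omega
      · by_cases hL : a = 'L'
        · subst hL; simp [List.foldl_cons, hU, hD, ih]; omega
        · by_cases hR : a = 'R'
          · subst hR; simp [List.foldl_cons, hU, hD, hL, ih]; omega
          · simp [List.foldl_cons, hU, hD, hL, hR, ih]

-- ===== VERDICT (by name: the statement is the Claim_ definition above) =====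
theorem coordinate_spec : Claim_equal_coordinate := by
  intro str _
  unfold Spec_coordinate coordinate coordinate_alt
  simp only [PySem.Str.count_eq, String.reduceToList, pv_count_single, pv_fold_counts]
  simp
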